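-- pv_equiv track=rewrite | github.com/hyperb1iss/uchroma | uchroma/client/cli_base.py | _extract_device_spec
-- ===== SOURCE A (Python) =====
-- def _extract_device_spec(args: list[str]) -> tuple[str | None, list[str]]:
--     """
--     Extract @device specifier from argument list.
--
--     Only extracts the first @-prefixed argument.
--
--     Returns:
--         (device_spec, remaining_args)
--     """
--     device_spec = None
--     remaining = []
--
--     for arg in args:
--         if arg.startswith("@") and device_spec is None:
--             device_spec = arg[1:]  # Strip @ prefix
--         else:
--             remaining.append(arg)
--
--     return device_spec, remaining
-- ===== SOURCE B (Python) =====
-- def _extract_device_spec(args: list[str]) -> tuple[str | None, list[str]]: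
--     """Locate the first @-prefixed argument, then splice it out."""
--     i = next((j for j, a in enumerate(args) if a.startswith("@")), None)
--     if i is None:
--         return None, list(args)
--     return args[i][1:], args[:i] + args[i + 1:]
-- ===== Notes on version B (the rewrite author's own statement) =====
-- stated objective: simpler
-- what changed: Replaces the conditional accumulator loop carrying mutable state with find-first-index followed by slice splicing (args[:i] + args[i+1:]), separating location from removal.
import Mathlib
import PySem

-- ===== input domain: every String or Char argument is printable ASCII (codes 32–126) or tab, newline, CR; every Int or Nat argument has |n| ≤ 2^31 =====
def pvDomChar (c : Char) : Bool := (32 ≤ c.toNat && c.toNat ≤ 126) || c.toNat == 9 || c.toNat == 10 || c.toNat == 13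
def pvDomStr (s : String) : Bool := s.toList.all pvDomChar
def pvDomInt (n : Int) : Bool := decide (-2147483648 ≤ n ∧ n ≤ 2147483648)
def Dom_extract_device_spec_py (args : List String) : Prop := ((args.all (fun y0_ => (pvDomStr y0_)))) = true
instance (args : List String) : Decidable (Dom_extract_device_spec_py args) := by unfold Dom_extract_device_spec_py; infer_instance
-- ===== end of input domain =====

-- B replaces A's stateful conditional loop with find-first-index + slice splicing (simpler decomposition; return-value equivalence).
-- ===== PORT A =====
-- A's for-loop: state (device_spec, remaining), one step per arg.
def extract_device_spec_py_loop (args : List String) (spec : Option String) (rem : List String) : Option String × List String :=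
  match args with
  | [] => (spec, rem)
  | a :: rest =>
    if PySem.Str.startswith a "@" && spec == none then
      extract_device_spec_py_loop rest (some (PySem.Str.slice a (some 1) none)) rem
    else
      extract_device_spec_py_loop rest spec (rem ++ [a])

def extract_device_spec_py (args : List String) : Option String × List String :=
  extract_device_spec_py_loop args none []

-- ===== PORT B =====
def extract_device_spec_py_alt (args : List String) : Option String × List String :=
  match args.findIdx? (fun a => PySem.Str.startswith a "@") with
  | none => (none, args)
  | some i => (args[i]?.map (fun s => PySem.Str.slice s (some 1) none),
               args.take i ++ args.drop (i + 1))

-- ===== PRECONDITION & SPEC =====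
def Spec_extract_device_spec_py (args : List String) (out : Option String × List String) : Prop := out = extract_device_spec_py_alt args
instance (args : List String) (out : Option String × List String) : Decidable (Spec_extract_device_spec_py args out) := by unfold Spec_extract_device_spec_py; infer_instance

-- ===== CLAIM (what is proved, stated in full; the proofs are below) =====
def Claim_equal_extract_device_spec_py : Prop := ∀ (args : List String), Dom_extract_device_spec_py args → Spec_extract_device_spec_py args (extract_device_spec_py args)

-- ===== LEMMAS AND PROOFS =====

-- ===== VERDICT (by name: the statement is the Claim_ definition above) =====
-- A's loop with spec already set just appends the rest.
theorem loop_some (args : List String) (d : String) (rem : List String) :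
    extract_device_spec_py_loop args (some d) rem = (some d, rem ++ args) := by
  induction args generalizing rem with
  | nil => simp [extract_device_spec_py_loop]
  | cons a rest ih => simp [extract_device_spec_py_loop, ih]

-- A's loop from the searching state equals B's find-then-splice, relative to the prefix rem.
theorem loop_none (args : List String) (rem : List String) :
    extract_device_spec_py_loop args none rem =
      match args.findIdx? (fun a => PySem.Chars.startswith a.toList ['@']) with
      | none => (none, rem ++ args)
      | some i => (args[i]?.map (fun s => PySem.Str.slice s (some 1) none),
                   rem ++ (args.take i ++ args.drop (i + 1))) := by
  induction args generalizing rem with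
  | nil => simp [extract_device_spec_py_loop]
  | cons a rest ih =>
    rw [List.findIdx?_cons]
    by_cases h : PySem.Chars.startswith a.toList ['@']
    · simp [extract_device_spec_py_loop, PySem.Str.startswith, h, loop_some]
    · rw [show extract_device_spec_py_loop (a :: rest) none rem
            = extract_device_spec_py_loop rest none (rem ++ [a]) from by
          simp [extract_device_spec_py_loop, PySem.Str.startswith, h]]
      rw [ih]
      cases hf : rest.findIdx? (fun a => PySem.Chars.startswith a.toList ['@']) with
      | none => simp [h]
      | some j => simp [h]

theorem extract_device_spec_py_spec : Claim_equal_extract_device_spec_py := by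
  intro args _
  unfold Spec_extract_device_spec_py extract_device_spec_py extract_device_spec_py_alt
  rw [loop_none]
  cases h : args.findIdx? (fun a => PySem.Chars.startswith a.toList ['@']) with
  | none => simp [PySem.Str.startswith, h]
  | some i => simp [PySem.Str.startswith, h]
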